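-- pv_equiv track=rewrite | github.com/Satwik-user/TradeBot_0 | backend/app/routers/technical_analysis.py | _calculate_overall_sentiment
-- ===== SOURCE A (Python) =====
-- def _calculate_overall_sentiment(summary: dict) -> str:
--     """Calculate overall market sentiment across timeframes"""
--     bullish_count = sum(1 for tf_data in summary.values() if tf_data.get('trend_direction') == 'bullish')
--     bearish_count = sum(1 for tf_data in summary.values() if tf_data.get('trend_direction') == 'bearish')
--
--     if bullish_count > bearish_count:
--         return "bullish"
--     elif bearish_count > bullish_count:
--         return "bearish"
--     else:
--         return "neutral"
-- ===== SOURCE B (Python) =====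
-- def _calculate_overall_sentiment(summary: dict) -> str:
--     """Calculate overall market sentiment across timeframes"""
--     weights = {'bullish': 1, 'bearish': -1}
--     score = sum(weights.get(tf_data.get('trend_direction'), 0) for tf_data in summary.values())
--     return 'bullish' if score > 0 else 'bearish' if score < 0 else 'neutral'
-- ===== Notes on version B (the rewrite author's own statement) =====
-- stated objective: alternative
-- what changed: Replaces the two separate counting passes with one pass that maps each timeframe through a weight table ({'bullish':1,'bearish':-1}, default 0) and sums the weights; the sign of the sum decides the verdict.
import Mathlib
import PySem

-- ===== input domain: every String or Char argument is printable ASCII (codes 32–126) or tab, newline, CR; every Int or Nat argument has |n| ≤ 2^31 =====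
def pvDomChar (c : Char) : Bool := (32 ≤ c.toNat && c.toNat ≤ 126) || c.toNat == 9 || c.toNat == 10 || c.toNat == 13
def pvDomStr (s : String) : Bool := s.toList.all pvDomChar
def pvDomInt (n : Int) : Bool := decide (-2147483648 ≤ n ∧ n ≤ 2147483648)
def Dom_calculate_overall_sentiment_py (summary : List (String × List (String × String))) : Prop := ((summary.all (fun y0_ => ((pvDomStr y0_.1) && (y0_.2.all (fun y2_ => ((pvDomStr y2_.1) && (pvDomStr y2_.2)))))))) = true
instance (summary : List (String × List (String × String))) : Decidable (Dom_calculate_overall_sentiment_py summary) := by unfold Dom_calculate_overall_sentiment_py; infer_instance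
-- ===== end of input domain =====

-- B replaces A's two counting passes by one weight-table map-and-sum pass; return values agree everywhere.

-- ===== PORT A =====
-- two generator-sum passes over summary.values(), then a three-way comparison
def calculate_overall_sentiment_py (summary : List (String × List (String × String))) : String :=
  let bullish_count : Int := summary.foldl (fun acc p =>
    if (PySem.Dict.mk p.2).get? "trend_direction" = some "bullish" then acc + 1 else acc) 0
  let bearish_count : Int := summary.foldl (fun acc p =>
    if (PySem.Dict.mk p.2).get? "trend_direction" = some "bearish" then acc + 1 else acc) 0
  if bullish_count > bearish_count then "bullish"
  else if bearish_count > bullish_count then "bearish"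
  else "neutral"

-- ===== PORT B =====
-- weights = {'bullish': 1, 'bearish': -1}
def pvWeights : PySem.Dict String Int := PySem.Dict.mk [("bullish", 1), ("bearish", -1)]

-- weights.get(tf_data.get('trend_direction'), 0); the key may be None (tf_data missing the key),
-- in which case the weight lookup misses and the default 0 applies — ported as the 'none' arm.
def pvWeightOf (tf_data : List (String × String)) : Int :=
  match (PySem.Dict.mk tf_data).get? "trend_direction" with
  | some d => pvWeights.getD d 0
  | none => 0

def calculate_overall_sentiment_py_alt (summary : List (String × List (String × String))) : String :=
  let score : Int := (summary.map (fun p => pvWeightOf p.2)).sum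
  if score > 0 then "bullish" else if score < 0 then "bearish" else "neutral"

-- ===== PRECONDITION & SPEC =====
def Spec_calculate_overall_sentiment_py (summary : List (String × List (String × String))) (out : String) : Prop := out = calculate_overall_sentiment_py_alt summary
instance (summary : List (String × List (String × String))) (out : String) : Decidable (Spec_calculate_overall_sentiment_py summary out) := by unfold Spec_calculate_overall_sentiment_py; infer_instance

-- ===== CLAIM (what is proved, stated in full; the proofs are below) =====
def Claim_equal_calculate_overall_sentiment_py : Prop := ∀ (summary : List (String × List (String × String))), Dom_calculate_overall_sentiment_py summary → Spec_calculate_overall_sentiment_py summary (calculate_overall_sentiment_py summary)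

-- ===== LEMMAS AND PROOFS =====

-- Pointwise: the weight of a timeframe is its bullish indicator minus its bearish indicator.
theorem pvWeightOf_eq (tf : List (String × String)) :
    pvWeightOf tf =
      (if (PySem.Dict.mk tf).get? "trend_direction" = some "bullish" then (1 : Int) else 0)
      - (if (PySem.Dict.mk tf).get? "trend_direction" = some "bearish" then (1 : Int) else 0) := by
  unfold pvWeightOf
  cases h : (PySem.Dict.mk tf).get? "trend_direction" with
  | none => simp
  | some d =>
      by_cases h1 : d = "bullish"
      · subst h1; simp [pvWeights, PySem.Dict.getD, PySem.Dict.get?]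
      · by_cases h2 : d = "bearish"
        · subst h2; simp [pvWeights, PySem.Dict.getD, PySem.Dict.get?, List.find?]
        · simp [pvWeights, PySem.Dict.getD, PySem.Dict.get?, List.find?,
                show ("bullish" == d) = false by simp [Ne.symm h1],
                show ("bearish" == d) = false by simp [Ne.symm h2], h1, h2]

-- A's counting foldl equals its init plus the sum of indicators.
theorem pv_foldl_count (l : List (String × List (String × String))) (c : String × List (String × String) → Prop)
    [DecidablePred c] : ∀ (b : Int),
    l.foldl (fun acc p => if c p then acc + 1 else acc) b
      = b + (l.map (fun p => if c p then (1 : Int) else 0)).sum := by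
  induction l with
  | nil => intro b; simp
  | cons hd tl ih =>
      intro b
      by_cases h : c hd
      · simp only [List.foldl_cons, List.map_cons, List.sum_cons, if_pos h, ih]; ring
      · simp only [List.foldl_cons, List.map_cons, List.sum_cons, if_neg h, ih]; ring

-- B's summed weights are A's bullish count minus A's bearish count.
theorem pv_sum_eq (l : List (String × List (String × String))) :
    (l.map (fun p => pvWeightOf p.2)).sum
      = l.foldl (fun acc p =>
          if (PySem.Dict.mk p.2).get? "trend_direction" = some "bullish" then acc + 1 else acc) 0
        - l.foldl (fun acc p =>
          if (PySem.Dict.mk p.2).get? "trend_direction" = some "bearish" then acc + 1 else acc) 0 := by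
  rw [pv_foldl_count l (fun p => (PySem.Dict.mk p.2).get? "trend_direction" = some "bullish"),
      pv_foldl_count l (fun p => (PySem.Dict.mk p.2).get? "trend_direction" = some "bearish")]
  simp only [zero_add]
  induction l with
  | nil => simp
  | cons hd tl ih =>
      simp only [List.map_cons, List.sum_cons, pvWeightOf_eq hd.2]
      rw [ih]; ring

-- ===== VERDICT (by name: the statement is the Claim_ definition above) =====
theorem calculate_overall_sentiment_py_spec : Claim_equal_calculate_overall_sentiment_py := by
  intro summary _
  unfold Spec_calculate_overall_sentiment_py calculate_overall_sentiment_py calculate_overall_sentiment_py_alt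
  rw [pv_sum_eq summary]
  set b := summary.foldl (fun acc p =>
    if (PySem.Dict.mk p.2).get? "trend_direction" = some "bullish" then acc + 1 else acc) (0 : Int)
  set r := summary.foldl (fun acc p =>
    if (PySem.Dict.mk p.2).get? "trend_direction" = some "bearish" then acc + 1 else acc) (0 : Int)
  by_cases h1 : b > r
  · simp [h1]
  · by_cases h2 : r > b
    · simp [h1, h2, show b - r < 0 by omega]
    · simp [h1, h2, show ¬ (b - r < 0) by omega]
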